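-- pv_equiv track=rewrite | github.com/badreaz/alx-higher_level_programming | 0x04-python-more_data_structures/2-uniq_add.py | uniq_add
-- ===== SOURCE A (Python) =====
-- def uniq_add(my_list=[]):
--     old = []
--     result = 0
--     for num in my_list:
--         if num not in old:
--             result += num
--         old.append(num)
--     return result
-- ===== SOURCE B (Python) =====
-- def uniq_add(my_list=[]):
--     # Sort a copy, then scan once, adding each value only when it differs
--     # from its predecessor (equal values are adjacent after sorting).
--     s = sorted(my_list)
--     total = 0
--     prev = None
--     for v in s:
--         if prev != v:
--             total += v
--         prev = v
--     return total
-- ===== Notes on version B (the rewrite author's own statement) =====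
-- stated objective: faster
-- what changed: B sorts a copy of the list and sums in one adjacent-neighbour scan (equal values become adjacent, so a value is added only when it differs from its predecessor), replacing A's per-element membership scan of a growing seen-list.
import Mathlib
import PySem

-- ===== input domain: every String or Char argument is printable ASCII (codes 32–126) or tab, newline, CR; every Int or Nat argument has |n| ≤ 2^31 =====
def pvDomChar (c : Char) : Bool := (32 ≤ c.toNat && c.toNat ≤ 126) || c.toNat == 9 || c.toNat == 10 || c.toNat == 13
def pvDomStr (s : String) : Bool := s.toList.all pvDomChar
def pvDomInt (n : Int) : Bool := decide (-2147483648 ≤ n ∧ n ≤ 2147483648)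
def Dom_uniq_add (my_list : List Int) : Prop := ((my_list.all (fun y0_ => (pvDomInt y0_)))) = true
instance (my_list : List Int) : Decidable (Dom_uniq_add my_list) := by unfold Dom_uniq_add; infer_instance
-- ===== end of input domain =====

-- B sorts a copy and sums in one adjacent-neighbour scan instead of A's per-element
-- membership scan of a growing seen-list (objective: faster).

-- ===== PORT A =====
-- A: loop keeping a list 'old' of seen values and adding num when not yet in 'old'
def uniq_add (my_list : List Int) : Int :=
  (my_list.foldl
    (fun st num =>
      let old := st.1
      let result := st.2
      let result := if num ∈ old then result else result + num
      (old ++ [num], result))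
    ([], 0)).2

-- ===== PORT B =====
-- B: s = sorted(my_list); scan s adding v when prev != v, tracking prev
def uniq_add_alt (my_list : List Int) : Int :=
  let s := PySem.List.sorted my_list (fun x => x) false
  (s.foldl
    (fun st v =>
      let total := st.1
      let prev := st.2
      let total := if prev ≠ some v then total + v else total
      (total, some v))
    ((0 : Int), (none : Option Int))).1

-- ===== PRECONDITION & SPEC =====
def Spec_uniq_add (my_list : List Int) (out : Int) : Prop := out = uniq_add_alt my_list
instance (my_list : List Int) (out : Int) : Decidable (Spec_uniq_add my_list out) := by unfold Spec_uniq_add; infer_instance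

-- ===== CLAIM (what is proved, stated in full; the proofs are below) =====
def Claim_equal_uniq_add : Prop := ∀ (my_list : List Int), Dom_uniq_add my_list → Spec_uniq_add my_list (uniq_add my_list)

-- ===== LEMMAS AND PROOFS =====
-- Loop invariant for A: from state (old, r), the loop returns r plus the sum of the
-- distinct elements of xs not already in old.
lemma uniq_add_loop (xs old : List Int) (r : Int) :
    (xs.foldl
      (fun st num =>
        let old := st.1
        let result := st.2
        let result := if num ∈ old then result else result + num
        (old ++ [num], result))
      (old, r)).2
    = r + ((PySem.Set.ofList xs).filter (fun y => decide (y ∉ old))).sum := by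
  induction xs generalizing old r with
  | nil => simp [PySem.Set.ofList]
  | cons a t ih =>
    simp only [List.foldl_cons, PySem.Set.ofList_cons, List.filter_cons, ih,
      PySem.Set.discard, List.filter_filter]
    rw [show (fun y => decide (y ∉ old ++ [a])) = (fun y : Int => decide (y ∉ old) && !(y == a)) from
      funext fun x => by
        simp [List.mem_append, not_or, Bool.decide_and, decide_not, Bool.and_comm,
          Bool.beq_eq_decide_eq]]
    by_cases h : a ∈ old
    · simp [h]
    · simp [h]
      ring

-- Loop invariant for B's scan: on a nondecreasing worklist t whose elements are all ≥ the
-- tracked predecessor, the scan returns total plus the sum of the distinct values of t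
-- other than the predecessor.
lemma alt_loop (t : List Int) (total : Int) (prev : Option Int)
    (hs : t.Pairwise (· ≤ ·))
    (hlb : ∀ x ∈ t, ∀ p, prev = some p → p ≤ x) :
    (t.foldl
      (fun st v =>
        let total := st.1
        let prev := st.2
        let total := if prev ≠ some v then total + v else total
        (total, some v))
      (total, prev)).1
    = total + ((PySem.Set.ofList t).filter (fun y => decide (prev ≠ some y))).sum := by
  induction t generalizing total prev with
  | nil => simp [PySem.Set.ofList]
  | cons v rest ih =>
    rw [List.pairwise_cons] at hs
    have hlb' : ∀ x ∈ rest, ∀ p, (some v : Option Int) = some p → p ≤ x := by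
      intro x hx p hpe
      cases hpe
      exact hs.1 x hx
    have hrec := fun (tt : Int) => ih tt (some v) hs.2 hlb'
    by_cases hp : prev = some v
    · simp only [List.foldl_cons, hp, ne_eq, not_true_eq_false, if_false]
      rw [hrec _]
      congr 1
      rw [PySem.Set.ofList_cons]
      simp only [List.filter_cons, PySem.Set.discard, List.filter_filter, decide_not,
        decide_true, Bool.not_true, Bool.false_eq_true, if_false]
      congr 1
      apply List.filter_congr
      intro y _
      by_cases h : y = v <;> simp [h]
    · simp only [List.foldl_cons, if_pos hp]
      rw [hrec _]
      have hkeep : ∀ y ∈ PySem.Set.ofList (v :: rest), (fun y => decide (prev ≠ some y)) y = true := by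
        intro y hy
        have hy' : y ∈ v :: rest := (PySem.Set.mem_ofList _ _).1 hy
        have hvy : v ≤ y := by
          rcases List.mem_cons.1 hy' with h | h
          · exact le_of_eq h.symm
          · exact hs.1 y h
        cases hpe : prev with
        | none => simp
        | some p =>
          have hpv : p ≤ v := hlb v (List.mem_cons_self) p hpe
          have : p ≠ v := fun h => hp (by rw [hpe, h])
          have : p < v := lt_of_le_of_ne hpv this
          simp only [ne_eq, Option.some.injEq, decide_eq_true_eq]
          intro h; omega
      rw [List.filter_eq_self.2 hkeep, PySem.Set.ofList_cons]
      simp only [List.sum_cons, PySem.Set.discard]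
      have : (List.filter (fun y => !(y == v)) (PySem.Set.ofList rest))
           = List.filter (fun y => decide (some v ≠ some y)) (PySem.Set.ofList rest) := by
        congr 1
        funext y
        by_cases h : y = v
        · simp [h]
        · have h2 : ¬ v = y := fun e => h e.symm
          simp [h, h2]
      rw [this]; ring

-- ===== VERDICT (by name: the statement is the Claim_ definition above) =====
theorem uniq_add_spec : Claim_equal_uniq_add := by
  intro xs _
  unfold Spec_uniq_add uniq_add uniq_add_alt
  rw [uniq_add_loop]
  have hpair : (PySem.List.sorted xs (fun x => x) false).Pairwise (· ≤ ·) := by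
    simpa using PySem.List.sorted_pairwise (xs := xs) (key := fun x => x)
  rw [alt_loop _ 0 none hpair (by simp)]
  have hperm : (PySem.Set.ofList (PySem.List.sorted xs (fun x => x) false)).Perm
      (PySem.Set.ofList xs) := by
    refine (List.perm_ext_iff_of_nodup (PySem.Set.nodup_ofList _) (PySem.Set.nodup_ofList _)).2 ?_
    intro a
    simp [PySem.Set.mem_ofList, (PySem.List.sorted_perm (xs := xs) (key := fun x => x) (rev := false)).mem_iff]
  simp only [List.not_mem_nil, not_false_eq_true, decide_true, List.filter_true, ne_eq,
    reduceCtorEq, not_false_eq_true, List.filter_true]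
  rw [hperm.sum_eq]
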